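-- pv_equiv track=rewrite | github.com/nickkatsios/BetEdge | scrappers/matchers/event_matcher.py | is_one_word_match
-- ===== SOURCE A (Python) =====
-- def is_one_word_match(team_name1, team_name2):
--     """Checks if a single word of one string exists in the other.
--
--     !!!!!!!!!!
--     Returns False Positives
--     eg "Manchester United" and "Manchester City" will match
--     !!!!!!!!!!
--
--     Args:
--     team_name1 (str): The name of the first team
--     team_name_2 (str): The name of the second team
--
--     Returns:
--     bool: True if the names match, False otherwise
--     """
--     words1 = team_name1.split()
--     words2 = team_name2.split()
--
--     for word in words1:
--         if word in words2:
--             return True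
--
--     for word in words2:
--         if word in words1:
--             return True
--
--     return False
-- ===== SOURCE B (Python) =====
-- def is_one_word_match(team_name1, team_name2):
--     """Sort both word lists and scan them in lockstep (merge-style) for a shared word."""
--     xs = sorted(team_name1.split())
--     ys = sorted(team_name2.split())
--     i = j = 0
--     while i < len(xs) and j < len(ys):
--         if xs[i] == ys[j]:
--             return True
--         if xs[i] < ys[j]:
--             i += 1
--         else:
--             j += 1
--     return False
-- ===== Notes on version B (the rewrite author's own statement) =====
-- stated objective: alternative
-- what changed: A's two nested membership loops are replaced by a sort-then-merge algorithm: both word lists are sorted and a single two-pointer lockstep scan detects a shared word.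
import Mathlib
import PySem

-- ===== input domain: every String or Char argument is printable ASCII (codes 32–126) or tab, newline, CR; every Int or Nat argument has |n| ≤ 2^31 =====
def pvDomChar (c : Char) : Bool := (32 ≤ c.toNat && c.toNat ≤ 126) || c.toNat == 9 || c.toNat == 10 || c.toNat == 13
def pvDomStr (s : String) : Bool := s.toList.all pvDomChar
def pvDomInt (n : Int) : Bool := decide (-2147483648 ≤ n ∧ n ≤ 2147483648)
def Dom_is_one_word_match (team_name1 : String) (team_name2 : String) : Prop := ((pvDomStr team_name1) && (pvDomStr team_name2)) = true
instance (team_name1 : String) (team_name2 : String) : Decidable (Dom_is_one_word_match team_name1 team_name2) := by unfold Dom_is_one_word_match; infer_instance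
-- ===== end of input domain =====

-- B replaces A's two membership loops by sort-then-merge: sort both word
-- lists and detect a shared word with one two-pointer scan; objective: alternative.

-- ===== PORT A =====
-- 'for word in words: if word in other: return True' (falls through to false)
def pvLoopA (words other : List String) : Bool :=
  match words with
  | [] => false
  | w :: rest => if other.contains w then true else pvLoopA rest other

def is_one_word_match (team_name1 : String) (team_name2 : String) : Bool :=
  let words1 := PySem.Str.split₀ team_name1
  let words2 := PySem.Str.split₀ team_name2
  match pvLoopA words1 words2 with
  | true => true
  | false =>
    match pvLoopA words2 words1 with
    | true => true
    | false => false

-- ===== PORT B =====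
-- the while loop of Source B: lockstep scan of the two sorted lists
def pvMerge : List String → List String → Bool
  | [], _ => false
  | _ :: _, [] => false
  | x :: xs, y :: ys =>
    if x = y then true
    else if x < y then pvMerge xs (y :: ys)
    else pvMerge (x :: xs) ys
  termination_by xs ys => xs.length + ys.length
  decreasing_by all_goals simp

def is_one_word_match_alt (team_name1 : String) (team_name2 : String) : Bool :=
  let xs := PySem.List.sorted (PySem.Str.split₀ team_name1) (fun x => x) false
  let ys := PySem.List.sorted (PySem.Str.split₀ team_name2) (fun x => x) false
  pvMerge xs ys

-- ===== PRECONDITION & SPEC =====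
def Spec_is_one_word_match (team_name1 : String) (team_name2 : String) (out : Bool) : Prop := out = is_one_word_match_alt team_name1 team_name2
instance (team_name1 : String) (team_name2 : String) (out : Bool) : Decidable (Spec_is_one_word_match team_name1 team_name2 out) := by unfold Spec_is_one_word_match; infer_instance

-- ===== CLAIM (what is proved, stated in full; the proofs are below) =====
def Claim_equal_is_one_word_match : Prop := ∀ (team_name1 : String) (team_name2 : String), Dom_is_one_word_match team_name1 team_name2 → Spec_is_one_word_match team_name1 team_name2 (is_one_word_match team_name1 team_name2)

-- ===== LEMMAS AND PROOFS =====
theorem pvLoopA_eq_true_iff (words other : List String) :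
    pvLoopA words other = true ↔ ∃ w ∈ words, w ∈ other := by
  induction words with
  | nil => simp [pvLoopA]
  | cons w rest ih =>
    simp only [pvLoopA]
    by_cases h : w ∈ other
    · simp [h]
    · simp [h, ih]

theorem pvMerge_true_common (xs ys : List String) (h : pvMerge xs ys = true) :
    ∃ w ∈ xs, w ∈ ys := by
  fun_induction pvMerge xs ys with
  | case1 ys => simp at h
  | case2 x xs => simp at h
  | case3 xs y ys =>
    exact ⟨y, by simp, by simp⟩
  | case4 x xs y ys hne hlt ih =>
    rcases ih h with ⟨w, hw1, hw2⟩
    exact ⟨w, by simp [hw1], hw2⟩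
  | case5 x xs y ys hne hlt ih =>
    rcases ih h with ⟨w, hw1, hw2⟩
    exact ⟨w, hw1, by simp [hw2]⟩

theorem pvMerge_complete (xs ys : List String)
    (hx : xs.Pairwise (· ≤ ·)) (hy : ys.Pairwise (· ≤ ·))
    (h : ∃ w ∈ xs, w ∈ ys) : pvMerge xs ys = true := by
  fun_induction pvMerge xs ys with
  | case1 ys => simp at h
  | case2 x xs => rcases h with ⟨w, _, hw⟩; simp at hw
  | case3 xs y ys => rfl
  | case4 x xs y ys hne hlt ih =>
    rcases h with ⟨w, hw1, hw2⟩
    rcases List.mem_cons.1 hw1 with rfl | hw1'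
    · -- w = x ∈ y :: ys, but x < y ≤ everything in ys
      exfalso
      rcases List.mem_cons.1 hw2 with rfl | hw2'
      · exact hne rfl
      · have := (List.pairwise_cons.1 hy).1 w hw2'
        exact absurd (lt_of_lt_of_le hlt this) (lt_irrefl w)
    · exact ih (List.pairwise_cons.1 hx).2 hy ⟨w, hw1', hw2⟩
  | case5 x xs y ys hne hlt ih =>
    rcases h with ⟨w, hw1, hw2⟩
    rcases List.mem_cons.1 hw2 with rfl | hw2'
    · exfalso
      rcases List.mem_cons.1 hw1 with rfl | hw1'
      · exact hne rfl
      · have hle := (List.pairwise_cons.1 hx).1 w hw1'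
        have hyx : w < x := lt_of_le_of_ne (not_lt.1 hlt) (Ne.symm hne)
        exact absurd (lt_of_lt_of_le hyx hle) (lt_irrefl w)
    · exact ih hx (List.pairwise_cons.1 hy).2 ⟨w, hw1, hw2'⟩

-- ===== VERDICT (by name: the statement is the Claim_ definition above) =====
theorem is_one_word_match_spec : Claim_equal_is_one_word_match := by
  intro t1 t2 _
  unfold Spec_is_one_word_match is_one_word_match is_one_word_match_alt
  set w1 := PySem.Str.split₀ t1
  set w2 := PySem.Str.split₀ t2
  set s1 := PySem.List.sorted w1 (fun x => x) false with hs1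
  set s2 := PySem.List.sorted w2 (fun x => x) false with hs2
  have hmem1 : ∀ x, x ∈ s1 ↔ x ∈ w1 := fun x => PySem.List.mem_sorted _ _ _ _
  have hmem2 : ∀ x, x ∈ s2 ↔ x ∈ w2 := fun x => PySem.List.mem_sorted _ _ _ _
  have hcom : pvMerge s1 s2 = true ↔ ∃ w ∈ w1, w ∈ w2 := by
    constructor
    · intro h
      rcases pvMerge_true_common _ _ h with ⟨w, hw1, hw2⟩
      exact ⟨w, (hmem1 w).1 hw1, (hmem2 w).1 hw2⟩
    · intro ⟨w, hw1, hw2⟩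
      exact pvMerge_complete _ _
        (by simpa using PySem.List.sorted_pairwise (xs := w1) (key := fun x => x))
        (by simpa using PySem.List.sorted_pairwise (xs := w2) (key := fun x => x))
        ⟨w, (hmem1 w).2 hw1, (hmem2 w).2 hw2⟩
  rw [Bool.eq_iff_iff, hcom]
  constructor
  · intro h
    rcases h1 : pvLoopA w1 w2 with _ | _
    · rcases h2 : pvLoopA w2 w1 with _ | _
      · simp [h1, h2] at h
      · rcases (pvLoopA_eq_true_iff w2 w1).1 h2 with ⟨w, hw2, hw1⟩
        exact ⟨w, hw1, hw2⟩
    · exact (pvLoopA_eq_true_iff w1 w2).1 h1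
  · intro h
    have h1 : pvLoopA w1 w2 = true := (pvLoopA_eq_true_iff w1 w2).2 h
    simp [h1]
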